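-- pv_equiv track=rewrite | github.com/tam17aki/benzaiten_pytorch | util.py | calc_durations
-- ===== SOURCE A (Python) =====
-- def calc_durations(notenums):
--     """連続するノートナンバーを統合して (notenums, durations) に変換."""
--     note_length = len(notenums)
--     duration = [1] * note_length
--     for i in range(note_length):
--         k = 1
--         while i + k < note_length:
--             if notenums[i] > 0 and notenums[i] == notenums[i + k]:
--                 notenums[i + k] = 0
--                 duration[i] += 1
--             else:
--                 break
--             k += 1
--     return notenums, duration
-- ===== SOURCE B (Python) =====
-- def calc_durations(notenums):
--     """Two staged passes: a backward DP of maximal-run lengths, then a pointwise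
--     decision per index (run start keeps its length, run interior with positive
--     value is zeroed in place). Mutates notenums in place like the original."""
--     n = len(notenums)
--     orig = list(notenums)
--     runlen = [1] * n
--     for i in range(n - 2, -1, -1):
--         if orig[i] == orig[i + 1]:
--             runlen[i] = runlen[i + 1] + 1
--     duration = [1] * n
--     for i in range(n):
--         if orig[i] > 0:
--             if i > 0 and orig[i - 1] == orig[i]:
--                 notenums[i] = 0
--             else:
--                 duration[i] = runlen[i]
--     return notenums, duration
-- ===== Notes on version B (the rewrite author's own statement) =====
-- stated objective: alternative
-- what changed: B replaces A's in-place nested while-loop (which walks forward from every index, zeroing and incrementing one step at a time) with two staged passes: a backward dynamic-programming pass computing the maximal-run length at every index, then an independent pointwise pass that assigns duration = run length at each run start and zeroes positive run interiors.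
import Mathlib
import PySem

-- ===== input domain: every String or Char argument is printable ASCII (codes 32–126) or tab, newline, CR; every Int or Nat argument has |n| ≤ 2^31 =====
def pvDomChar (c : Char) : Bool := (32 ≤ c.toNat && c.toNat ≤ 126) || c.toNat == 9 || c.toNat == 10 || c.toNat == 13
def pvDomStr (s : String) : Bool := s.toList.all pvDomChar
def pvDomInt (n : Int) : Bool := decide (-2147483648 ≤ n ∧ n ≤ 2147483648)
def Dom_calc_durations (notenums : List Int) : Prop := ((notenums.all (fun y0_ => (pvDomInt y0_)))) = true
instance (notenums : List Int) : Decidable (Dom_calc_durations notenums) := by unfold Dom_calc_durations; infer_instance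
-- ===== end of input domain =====

-- B replaces A's nested in-place while-loop with two staged passes (a backward DP of
-- maximal-run lengths, then an independent pointwise decision per index); same return value.
-- (Both the Python A and the Python B mutate the notenums argument in place; the equality
-- proved here is about the returned pair, which contains that updated list.)

-- ===== PORT A =====
-- inner `while i + k < n:` loop of A; state st = (notenums, duration).
-- `fuel` only bounds the recursion; it is called with fuel = n ≥ n - (i + k), so it never
-- runs out before the loop's own exit conditions fire.
def calcA_inner (n i : Nat) (fuel k : Nat) (st : List Int × List Int) : List Int × List Int :=
  match fuel with
  | 0 => st
  | fuel + 1 =>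
    if i + k < n then
      if 0 < st.1.getD i 0 ∧ st.1.getD i 0 = st.1.getD (i + k) 0 then
        calcA_inner n i fuel (k + 1) (st.1.set (i + k) 0, st.2.set i (st.2.getD i 0 + 1))
      else st
    else st

def calc_durations (notenums : List Int) : List Int × List Int :=
  let n := notenums.length
  (List.range n).foldl (fun st i => calcA_inner n i n 1 st) (notenums, List.replicate n (1 : Int))

-- ===== PORT B =====
-- backward DP pass of Source B (`for i in range(n-2,-1,-1): if orig[i]==orig[i+1]: runlen[i]=runlen[i+1]+1`),
-- written as the obvious back-to-front structural recursion building the same array.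
def runlens : List Int → List Int
  | [] => []
  | [_] => [1]
  | x :: y :: rest =>
      (if x = y then (runlens (y :: rest)).headD 1 + 1 else 1) :: runlens (y :: rest)

-- second pass of Source B: per-index pointwise decision over the ORIGINAL values.
def calc_durations_alt (notenums : List Int) : List Int × List Int :=
  let n := notenums.length
  let runlen := runlens notenums
  (List.range n).foldl
    (fun st i =>
      if 0 < notenums.getD i 0 then
        if 0 < i ∧ notenums.getD (i - 1) 0 = notenums.getD i 0 then
          (st.1.set i 0, st.2)
        else (st.1, st.2.set i (runlen.getD i 1))
      else st)
    (notenums, List.replicate n (1 : Int))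

-- ===== PRECONDITION & SPEC =====
def Spec_calc_durations (notenums : List Int) (out : List Int × List Int) : Prop := out = calc_durations_alt notenums
instance (notenums : List Int) (out : List Int × List Int) : Decidable (Spec_calc_durations notenums out) := by unfold Spec_calc_durations; infer_instance

-- ===== CLAIM (what is proved, stated in full; the proofs are below) =====
def Claim_equal_calc_durations : Prop := ∀ (notenums : List Int), Dom_calc_durations notenums → Spec_calc_durations notenums (calc_durations notenums)

-- ===== LEMMAS AND PROOFS =====

-- run length of the maximal constant run at the head of a list (proof-side spec)
def rl : List Int → Nat
  | [] => 0
  | [_] => 1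
  | x :: y :: rest => if x = y then rl (y :: rest) + 1 else 1

lemma rl_pos (l : List Int) (h : l ≠ []) : 1 ≤ rl l := by
  match l with
  | [_] => simp [rl]
  | x :: y :: rest => simp only [rl]; split
                      · omega
                      · omega

lemma rl_le_length (l : List Int) : rl l ≤ l.length := by
  match l with
  | [] => simp [rl]
  | [_] => simp [rl]
  | x :: y :: rest =>
    have := rl_le_length (y :: rest)
    simp only [rl]; split <;> simp_all

-- getD helpers
lemma getD_set_self (l : List Int) (i : Nat) (v : Int) (h : i < l.length) :
    (l.set i v).getD i 0 = v := by
  rw [List.getD_eq_getElem?_getD, List.getElem?_set_self h]; rfl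

lemma getD_set_ne (l : List Int) (i j : Nat) (v : Int) (h : i ≠ j) :
    (l.set i v).getD j 0 = l.getD j 0 := by
  rw [List.getD_eq_getElem?_getD, List.getElem?_set_ne h, ← List.getD_eq_getElem?_getD]

-- one step of the rl recurrence, phrased on drops
lemma rl_drop_step (l : List Int) (i : Nat) (h : i < l.length) :
    rl (l.drop i) =
      if i + 1 < l.length then
        (if l.getD i 0 = l.getD (i + 1) 0 then rl (l.drop (i + 1)) + 1 else 1)
      else 1 := by
  have hdi : l.drop i = l[i] :: l.drop (i + 1) := List.drop_eq_getElem_cons h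
  by_cases h2 : i + 1 < l.length
  · have hdi2 : l.drop (i + 1) = l[i + 1] :: l.drop (i + 2) := List.drop_eq_getElem_cons h2
    rw [if_pos h2, hdi, hdi2]
    have e1 : l.getD i 0 = l[i] := List.getD_eq_getElem l 0 h
    have e2 : l.getD (i + 1) 0 = l[i + 1] := List.getD_eq_getElem l 0 h2
    simp only [rl, e1, e2, ← hdi2]
  · have : l.drop (i + 1) = [] := List.drop_eq_nil_of_le (by omega)
    rw [if_neg h2, hdi, this, rl]

-- every element of the head run equals the run's first element
lemma rl_mem (l : List Int) :
    ∀ fuel i t, l.length - i ≤ fuel → i < l.length → i ≤ t → t < i + rl (l.drop i) →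
      l.getD t 0 = l.getD i 0 := by
  intro fuel
  induction fuel with
  | zero => intro i t hf hi; omega
  | succ fuel ih =>
    intro i t hf hi h1 h2
    rcases Nat.eq_or_lt_of_le h1 with rfl | h1
    · rfl
    · rw [rl_drop_step l i hi] at h2
      by_cases hn : i + 1 < l.length
      · rw [if_pos hn] at h2
        by_cases he : l.getD i 0 = l.getD (i + 1) 0
        · rw [if_pos he] at h2
          rw [ih (i + 1) t (by omega) hn h1 (by omega), he]
        · rw [if_neg he] at h2; omega
      · rw [if_neg hn] at h2; omega

-- the element just past the head run differs from the run's value (if in range)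
lemma rl_stop (l : List Int) :
    ∀ fuel i, l.length - i ≤ fuel → i < l.length → i + rl (l.drop i) < l.length →
      l.getD (i + rl (l.drop i)) 0 ≠ l.getD i 0 := by
  intro fuel
  induction fuel with
  | zero => intro i hf hi; omega
  | succ fuel ih =>
    intro i hf hi hJ
    rw [rl_drop_step l i hi] at hJ ⊢
    by_cases hn : i + 1 < l.length
    · rw [if_pos hn] at hJ ⊢
      by_cases he : l.getD i 0 = l.getD (i + 1) 0
      · rw [if_pos he] at hJ ⊢
        have := ih (i + 1) (by omega) hn (by omega)
        rw [show i + (rl (l.drop (i + 1)) + 1) = (i + 1) + rl (l.drop (i + 1)) by omega, he]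
        exact this
      · rw [if_neg he] at hJ ⊢
        simpa using fun hx => he hx.symm
    · rw [if_neg hn] at hJ; omega

-- the runlens array holds exactly the head-run lengths of the drops
lemma runlens_getD (l : List Int) :
    ∀ i, i < l.length → (runlens l).getD i 1 = ((rl (l.drop i) : Nat) : Int) := by
  match l with
  | [] => intro i hi; simp at hi
  | [x] =>
    intro i hi
    match i with
    | 0 => simp [runlens, rl]
  | x :: y :: rest =>
    intro i hi
    match i with
    | 0 =>
      have hh : (runlens (y :: rest)).headD 1 = rl (y :: rest) := by
        have h0 := runlens_getD (y :: rest) 0 (by simp)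
        rw [List.getD_eq_getElem?_getD, ← List.head?_eq_getElem?, ← List.headD_eq_head?] at h0
        exact_mod_cast h0
      simp only [runlens, List.drop_zero, rl, List.getD_cons_zero, hh]
      split <;> push_cast <;> ring
    | i + 1 =>
      have := runlens_getD (y :: rest) i (by simpa using hi)
      simpa [runlens, List.getD_cons_succ] using this

-- the zeroing of a contiguous window, as a fold (shared shape of both sides' effect)
def zf (nn : List Int) (a len : Nat) : List Int :=
  (List.range' a len).foldl (fun l t => l.set t 0) nn

lemma zf_zero (nn : List Int) (a : Nat) : zf nn a 0 = nn := rfl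

lemma zf_concat (nn : List Int) (a len : Nat) :
    zf nn a (len + 1) = (zf nn a len).set (a + len) 0 := by
  have h : List.range' a (len + 1) = List.range' a len ++ [a + len] := by
    have := @List.range'_append a len 1 1
    simpa using this.symm
  simp [zf, h]

lemma zf_length (nn : List Int) (a len : Nat) : (zf nn a len).length = nn.length := by
  induction len with
  | zero => rfl
  | succ m ih => rw [zf_concat]; simp [ih]

lemma zf_getD_lt (nn : List Int) (a len t : Nat) (h : t < a) :
    (zf nn a len).getD t 0 = nn.getD t 0 := by
  induction len with
  | zero => rfl
  | succ m ih =>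
    rw [zf_concat]
    rw [List.getD_eq_getElem?_getD, List.getElem?_set_ne (by omega), ← List.getD_eq_getElem?_getD, ih]

lemma zf_getD_ge (nn : List Int) (a len t : Nat) (h : a + len ≤ t) :
    (zf nn a len).getD t 0 = nn.getD t 0 := by
  induction len with
  | zero => rfl
  | succ m ih =>
    rw [zf_concat]
    rw [List.getD_eq_getElem?_getD, List.getElem?_set_ne (by omega), ← List.getD_eq_getElem?_getD,
      ih (by omega)]

lemma zf_getD_mid (nn : List Int) (a len t : Nat) (h1 : a ≤ t) (h2 : t < a + len)
    (h3 : t < nn.length) : (zf nn a len).getD t 0 = 0 := by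
  induction len with
  | zero => omega
  | succ m ih =>
    rw [zf_concat]
    by_cases he : t = a + m
    · subst he; exact getD_set_self _ _ _ (by rw [zf_length]; omega)
    · rw [getD_set_ne _ _ _ _ (by omega)]; exact ih (by omega)

lemma set_one_self (dur : List Int) (i : Nat) (h : i < dur.length) (hv : dur.getD i 0 = 1) :
    dur.set i 1 = dur := by
  apply List.ext_getElem (by simp)
  intro t h1 h2
  rw [List.getElem_set]
  split
  · next he =>
    subst he
    rw [List.getD_eq_getElem?_getD, List.getElem?_eq_getElem h] at hv
    simpa using hv.symm
  · rfl

-- A's inner loop stops exactly at the end of the run (any remaining fuel)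
lemma calcA_inner_stop (n : Nat) (nn dur : List Int) (i : Nat) (v : Int) (J : Nat)
    (hvi : nn.getD i 0 = v)
    (hstop : J < n → nn.getD J 0 ≠ v)
    (fuel k : Nat) (hk1 : 1 ≤ k) (hkJ : i + k = J) :
    calcA_inner n i fuel k (zf nn (i + 1) (k - 1), dur.set i (k : Int))
      = (zf nn (i + 1) (J - (i + 1)), dur.set i ((J - i : Nat) : Int)) := by
  have hk' : k - 1 = J - (i + 1) := by omega
  have hJi : J - i = k := by omega
  match fuel with
  | 0 => rw [calcA_inner, hk', hJi]
  | fuel + 1 =>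
    rw [calcA_inner]
    split
    · next h =>
      rw [if_neg]
      · rw [hk', hJi]
      · rintro ⟨_, heq⟩
        have h1 : (zf nn (i + 1) (k - 1)).getD i 0 = v := by
          rw [zf_getD_lt _ _ _ _ (by omega)]; exact hvi
        have h2 : (zf nn (i + 1) (k - 1)).getD (i + k) 0 = nn.getD (i + k) 0 := by
          exact zf_getD_ge _ _ _ _ (by omega)
        simp only [h1, h2] at heq
        exact hstop (by omega) (by rw [← hkJ]; exact heq.symm)
    · next h => rw [hk', hJi]

-- A's inner loop, starting mid-run, finishes the run: generalized over k
lemma calcA_inner_run (n : Nat) (nn dur : List Int) (i : Nat) (v : Int) (J : Nat)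
    (hd : dur.length = n) (hi : i < n)
    (hv : 0 < v) (hvi : nn.getD i 0 = v)
    (hmem : ∀ t, i + 1 ≤ t → t < J → nn.getD t 0 = v)
    (hstop : J < n → nn.getD J 0 ≠ v) (hJn : J ≤ n) :
    ∀ fuel k, 1 ≤ k → i + k ≤ J → J - (i + k) ≤ fuel →
    calcA_inner n i fuel k (zf nn (i + 1) (k - 1), dur.set i (k : Int))
      = (zf nn (i + 1) (J - (i + 1)), dur.set i ((J - i : Nat) : Int)) := by
  intro fuel
  induction fuel with
  | zero =>
    intro k hk1 hkJ hm
    exact calcA_inner_stop n nn dur i v J hvi hstop 0 k hk1 (by omega)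
  | succ fuel ih =>
    intro k hk1 hkJ hm
    by_cases hkJ' : i + k = J
    · exact calcA_inner_stop n nn dur i v J hvi hstop (fuel + 1) k hk1 hkJ'
    · have hlt : i + k < J := by omega
      rw [calcA_inner]
      rw [if_pos (by omega)]
      have h1 : (zf nn (i + 1) (k - 1)).getD i 0 = v := by
        rw [zf_getD_lt _ _ _ _ (by omega)]; exact hvi
      have h2 : (zf nn (i + 1) (k - 1)).getD (i + k) 0 = v := by
        rw [zf_getD_ge _ _ _ _ (by omega)]; exact hmem (i + k) (by omega) hlt
      rw [if_pos (by simp only [h1, h2]; exact ⟨hv, trivial⟩)]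
      have hset : (zf nn (i + 1) (k - 1)).set (i + k) 0 = zf nn (i + 1) k := by
        have : k = (k - 1) + 1 := by omega
        rw [this, zf_concat]
        congr 1
        omega
      have hdur : (dur.set i (k : Int)).set i ((dur.set i (k : Int)).getD i 0 + 1)
          = dur.set i ((k + 1 : Nat) : Int) := by
        rw [getD_set_self _ _ _ (by omega), List.set_set]
        push_cast
        ring_nf
      simp only [hset, hdur]
      have := ih (k + 1) (by omega) (by omega) (by omega)
      simpa [Nat.add_sub_cancel] using this

-- A's inner loop is a no-op when the current value is ≤ 0
lemma calcA_inner_noop (n i fuel : Nat) (st : List Int × List Int) (h : st.1.getD i 0 ≤ 0) :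
    calcA_inner n i fuel 1 st = st := by
  match fuel with
  | 0 => rw [calcA_inner]
  | fuel + 1 =>
    rw [calcA_inner]
    split
    · rw [if_neg]; intro ⟨h1, _⟩; omega
    · rfl

-- folding A's step over indices whose value is ≤ 0 does nothing
lemma foldA_noop (n fuel : Nat) (l : List Nat) (st : List Int × List Int)
    (h : ∀ t ∈ l, st.1.getD t 0 ≤ 0) :
    l.foldl (fun s t => calcA_inner n t fuel 1 s) st = st := by
  induction l with
  | nil => rfl
  | cons x xs ih =>
    simp only [List.foldl_cons]
    rw [calcA_inner_noop n x fuel st (h x (by simp))]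
    exact ih (fun t ht => h t (by simp [ht]))

-- B's step function (abbreviation for the proofs; literally the fold body of calc_durations_alt)
def stepB (orig : List Int) (st : List Int × List Int) (i : Nat) : List Int × List Int :=
  if 0 < orig.getD i 0 then
    if 0 < i ∧ orig.getD (i - 1) 0 = orig.getD i 0 then
      (st.1.set i 0, st.2)
    else (st.1, st.2.set i ((runlens orig).getD i 1))
  else st

-- B's fold over a window of positive run interiors zeroes exactly that window
lemma foldB_zero (orig : List Int) :
    ∀ (m a : Nat) (nn dur : List Int),
      (∀ t, a ≤ t → t < a + m →
        0 < orig.getD t 0 ∧ 0 < t ∧ orig.getD (t - 1) 0 = orig.getD t 0) →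
      (List.range' a m).foldl (stepB orig) (nn, dur) = (zf nn a m, dur) := by
  intro m
  induction m with
  | zero => intro a nn dur h; simp [zf]
  | succ m ih =>
    intro a nn dur h
    rw [List.range'_succ, List.foldl_cons]
    obtain ⟨h1, h2, h3⟩ := h a (le_refl a) (by omega)
    rw [show stepB orig (nn, dur) a = (nn.set a 0, dur) by
      unfold stepB; rw [if_pos h1, if_pos ⟨h2, h3⟩]]
    rw [ih (a + 1) (nn.set a 0) dur (fun t ht1 ht2 => h t (by omega) (by omega))]
    -- zf nn a (m+1) = zf (nn.set a 0) (a+1) m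
    have : zf nn a (m + 1) = zf (nn.set a 0) (a + 1) m := by
      unfold zf
      rw [List.range'_succ, List.foldl_cons]
    rw [this]

-- B's fold over a window of nonpositive values does nothing
lemma foldB_noop (orig : List Int) (l : List Nat) (st : List Int × List Int)
    (h : ∀ t ∈ l, orig.getD t 0 ≤ 0) :
    l.foldl (stepB orig) st = st := by
  induction l with
  | nil => rfl
  | cons x xs ih =>
    simp only [List.foldl_cons]
    rw [show stepB orig st x = st by unfold stepB; rw [if_neg (by have := h x (by simp); omega)]]
    exact ih (fun t ht => h t (by simp [ht]))

-- main equivalence: run-by-run, A's fold and B's fold transform the state identically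
lemma main_eq (orig : List Int) (n : Nat) (hn : n = orig.length) :
    ∀ fuel i (nn dur : List Int),
      nn.length = n → dur.length = n → n - i ≤ fuel →
      (∀ t, i ≤ t → nn.getD t 0 = orig.getD t 0) →
      (∀ t, i ≤ t → t < n → dur.getD t 0 = 1) →
      (i < n → (i = 0 ∨ orig.getD (i - 1) 0 ≠ orig.getD i 0)) →
      (List.range' i (n - i)).foldl (fun st t => calcA_inner n t n 1 st) (nn, dur)
        = (List.range' i (n - i)).foldl (stepB orig) (nn, dur) := by
  intro fuel
  induction fuel with
  | zero =>
    intro i nn dur h1 h2 hm _ _ _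
    rw [show n - i = 0 by omega]
    rfl
  | succ fuel ih =>
    intro i nn dur hlen hd hm hagree hdur hstart
    by_cases hin : i < n
    · set J := i + rl (orig.drop i) with hJdef
      have hne : orig.drop i ≠ [] := by
        intro h; have := List.drop_eq_nil_iff.mp h; omega
      have hJ1 : i + 1 ≤ J := by have := rl_pos _ hne; omega
      have hJn : J ≤ n := by
        have := rl_le_length (orig.drop i)
        rw [List.length_drop] at this; omega
      have hmemO : ∀ t, i ≤ t → t < J → orig.getD t 0 = orig.getD i 0 := by
        intro t ht1 ht2
        exact rl_mem orig (orig.length - i) i t (le_refl _) (by omega) ht1 (by omega)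
      have hstopO : J < n → orig.getD J 0 ≠ orig.getD i 0 := by
        intro h
        exact rl_stop orig (orig.length - i) i (le_refl _) (by omega) (by omega)
      -- split the index range at the end of the run
      have hsplit : List.range' i (n - i) = List.range' i (J - i) ++ List.range' J (n - J) := by
        have := @List.range'_append i (J - i) (n - J) 1
        simp only [one_mul] at this
        rw [show i + (J - i) = J by omega] at this
        rw [show (J - i) + (n - J) = n - i by omega] at this
        exact this.symm
      have hhead : List.range' i (J - i) = i :: List.range' (i + 1) (J - i - 1) := by
        conv_lhs => rw [show J - i = (J - i - 1) + 1 by omega]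
        rw [List.range'_succ]
      -- invariants for the recursive call at J
      have hstart' : J < n → (J = 0 ∨ orig.getD (J - 1) 0 ≠ orig.getD J 0) := by
        intro hJltn
        right
        have e1 : orig.getD (J - 1) 0 = orig.getD i 0 := hmemO (J - 1) (by omega) (by omega)
        rw [e1]
        exact fun h => hstopO hJltn h.symm
      rw [hsplit, List.foldl_append, List.foldl_append, hhead]
      simp only [List.foldl_cons]
      by_cases hpos : 0 < orig.getD i 0
      · -- positive run
        have hvi : nn.getD i 0 = orig.getD i 0 := hagree i (le_refl i)
        -- A processes the entire run at its head
        have hstepA : calcA_inner n i n 1 (nn, dur)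
            = (zf nn (i + 1) (J - (i + 1)), dur.set i ((J - i : Nat) : Int)) := by
          have hd1 : dur = dur.set i (1 : Int) :=
            (set_one_self dur i (by omega) (hdur i (le_refl i) hin)).symm
          have h0 : (nn, dur) = (zf nn (i + 1) 0, dur.set i ((1 : Nat) : Int)) := by
            rw [zf_zero, Nat.cast_one, ← hd1]
          rw [h0]
          exact calcA_inner_run n nn dur i (nn.getD i 0) J hd hin (by omega) rfl
            (fun t ht1 ht2 => by
              rw [hagree t (by omega), hvi]; exact hmemO t (by omega) ht2)
            (fun h hc => hstopO h (by rw [← hagree J (by omega), hc, hvi])) hJn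
            n 1 (le_refl 1) (by omega) (by omega)
        rw [hstepA]
        have hskipA : (List.range' (i + 1) (J - i - 1)).foldl (fun st t => calcA_inner n t n 1 st)
            (zf nn (i + 1) (J - (i + 1)), dur.set i ((J - i : Nat) : Int))
            = (zf nn (i + 1) (J - (i + 1)), dur.set i ((J - i : Nat) : Int)) := by
          apply foldA_noop
          intro t ht
          rw [List.mem_range'_1] at ht
          show (zf nn (i + 1) (J - (i + 1))).getD t 0 ≤ 0
          exact le_of_eq (zf_getD_mid nn (i + 1) (J - (i + 1)) t (by omega) (by omega) (by omega))
        rw [hskipA]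
        -- B's head step assigns duration := runlen
        have hstepB : stepB orig (nn, dur) i = (nn, dur.set i ((J - i : Nat) : Int)) := by
          unfold stepB
          rw [if_pos hpos, if_neg, runlens_getD orig i (by omega)]
          · rw [show rl (orig.drop i) = J - i by omega]
          · rcases hstart hin with h0 | hne'
            · subst h0; rintro ⟨h, _⟩; omega
            · rintro ⟨_, h⟩; exact hne' h
        rw [hstepB]
        -- B's interior steps zero the run tail
        have hskipB : (List.range' (i + 1) (J - i - 1)).foldl (stepB orig)
            (nn, dur.set i ((J - i : Nat) : Int))
            = (zf nn (i + 1) (J - i - 1), dur.set i ((J - i : Nat) : Int)) := by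
          apply foldB_zero
          intro t ht1 ht2
          have htJ : t < J := by omega
          refine ⟨?_, by omega, ?_⟩
          · rw [hmemO t (by omega) htJ]; exact hpos
          · rw [hmemO t (by omega) htJ, hmemO (t - 1) (by omega) (by omega)]
        rw [hskipB, show J - i - 1 = J - (i + 1) by omega]
        exact ih J _ _ (by rw [zf_length]; exact hlen) (by simp [hd]) (by omega)
          (fun t ht => by rw [zf_getD_ge _ _ _ _ (by omega)]; exact hagree t (by omega))
          (fun t ht1 ht2 => by
            rw [getD_set_ne _ _ _ _ (by omega)]; exact hdur t (by omega) ht2)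
          hstart'
      · -- nonpositive run: both sides do nothing across it
        have hval : ∀ t, i ≤ t → t < J → nn.getD t 0 ≤ 0 := by
          intro t ht1 ht2
          rw [hagree t ht1, hmemO t ht1 ht2]; omega
        rw [calcA_inner_noop n i n (nn, dur) (hval i (le_refl i) (by omega))]
        have hskipA : (List.range' (i + 1) (J - i - 1)).foldl (fun st t => calcA_inner n t n 1 st)
            (nn, dur) = (nn, dur) := by
          apply foldA_noop
          intro t ht
          rw [List.mem_range'_1] at ht
          exact hval t (by omega) (by omega)
        rw [hskipA]
        have hstepB : stepB orig (nn, dur) i = (nn, dur) := by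
          unfold stepB
          rw [if_neg (by rw [← hagree i (le_refl i)]; exact fun h => absurd (hval i (le_refl i) (by omega)) (by omega))]
        rw [hstepB]
        have hskipB : (List.range' (i + 1) (J - i - 1)).foldl (stepB orig) (nn, dur) = (nn, dur) := by
          apply foldB_noop
          intro t ht
          rw [List.mem_range'_1] at ht
          rw [← hagree t (by omega)]
          exact hval t (by omega) (by omega)
        rw [hskipB]
        exact ih J _ _ hlen hd (by omega) (fun t ht => hagree t (by omega))
          (fun t ht1 ht2 => hdur t (by omega) ht2) hstart'
    · rw [show n - i = 0 by omega]
      rfl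

-- ===== VERDICT (by name: the statement is the Claim_ definition above) =====
theorem calc_durations_spec : Claim_equal_calc_durations := by
  intro notenums _
  unfold Spec_calc_durations calc_durations calc_durations_alt
  simp only []
  have hB : (fun (st : List Int × List Int) (i : Nat) =>
      if 0 < notenums.getD i 0 then
        if 0 < i ∧ notenums.getD (i - 1) 0 = notenums.getD i 0 then
          (st.1.set i 0, st.2)
        else (st.1, st.2.set i ((runlens notenums).getD i 1))
      else st) = stepB notenums := by
    funext st i
    unfold stepB
    rfl
  rw [hB]
  have h0 : List.range notenums.length = List.range' 0 (notenums.length - 0) := by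
    simp [List.range_eq_range']
  rw [h0]
  exact main_eq notenums notenums.length rfl notenums.length 0 notenums _ rfl (by simp) (by omega)
    (fun t _ => rfl)
    (fun t _ ht => by simp [List.getD_eq_getElem?_getD, ht])
    (fun _ => Or.inl rfl)
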